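-- pv_equiv track=rewrite | github.com/space-angel/WJ3_ForeverBeauty_BE | app/models/postgres_models.py | _parse_effects
-- ===== SOURCE A (Python) =====
-- from typing import List, Dict, Optional, Any, Union
--
-- def _parse_effects(effects_text: str) -> List[str]:
--     """효과 텍스트를 파싱하여 개별 효과 추출"""
--     if not effects_text:
--         return []
--
--     # 쉼표, 세미콜론, 줄바꿈으로 분리
--     effects = []
--     for separator in [',', ';', '\n']:
--         effects_text = effects_text.replace(separator, '|')
--
--     parsed_effects = [
--         effect.strip()
--         for effect in effects_text.split('|')
--         if effect.strip()
--     ]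
--
--     return parsed_effects
-- ===== SOURCE B (Python) =====
-- def _parse_effects(effects_text: str):
--     """Single-pass character tokenizer: no intermediate replaced strings, no split."""
--     if not effects_text:
--         return []
--     parts = []
--     cur = []
--     for ch in effects_text + ',':
--         if ch in ',;\n|':
--             token = ''.join(cur).strip()
--             if token:
--                 parts.append(token)
--             cur = []
--         else:
--             cur.append(ch)
--     return parts
-- ===== Notes on version B (the rewrite author's own statement) =====
-- stated objective: alternative
-- what changed: Replaces A's three full-string replace passes plus a split-on-sentinel and a strip/filter comprehension by one left-to-right character scan with an explicit token accumulator that emits each stripped nonempty token as soon as a separator (or end of input) is reached.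
import Mathlib
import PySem

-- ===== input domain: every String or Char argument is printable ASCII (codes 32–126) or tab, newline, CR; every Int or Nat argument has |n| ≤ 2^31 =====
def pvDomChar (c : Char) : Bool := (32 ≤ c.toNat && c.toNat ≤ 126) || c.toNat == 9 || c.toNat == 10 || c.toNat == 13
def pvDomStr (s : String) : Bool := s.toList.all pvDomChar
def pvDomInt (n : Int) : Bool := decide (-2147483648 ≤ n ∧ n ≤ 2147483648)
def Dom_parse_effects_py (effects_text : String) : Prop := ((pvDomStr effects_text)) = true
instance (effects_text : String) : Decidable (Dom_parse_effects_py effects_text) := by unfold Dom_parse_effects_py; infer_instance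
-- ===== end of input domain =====

-- B replaces A's three replace passes + split-on-'|' + strip/filter comprehension by one
-- left-to-right character scan with a token accumulator (alternative decomposition, same cost).


-- ===== PORT A =====
def parse_effects_py (effects_text : String) : List String :=
  if effects_text = "" then []
  else
    -- for separator in [',', ';', '\n']: effects_text = effects_text.replace(separator, '|')
    let t := [",", ";", "\n"].foldl (fun acc sep => PySem.Str.replace acc sep "|") effects_text
    -- [effect.strip() for effect in effects_text.split('|') if effect.strip()]
    ((PySem.Chars.splitOn t.toList ['|']).filter
        (fun e => decide (PySem.Chars.strip e ≠ []))).map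
      (fun e => String.ofList (PySem.Chars.strip e))

-- ===== PORT B =====
def pvSepB (c : Char) : Bool := c == ',' || c == ';' || c == '\n' || c == '|'

def pvStepB (st : List String × List Char) (c : Char) : List String × List Char :=
  if pvSepB c then
    let token := PySem.Chars.strip st.2
    (if token ≠ [] then st.1 ++ [String.ofList token] else st.1, [])
  else
    (st.1, st.2 ++ [c])

def parse_effects_py_alt (effects_text : String) : List String :=
  if effects_text = "" then []
  else ((effects_text.toList ++ [',']).foldl pvStepB ([], [])).1

-- ===== PRECONDITION & SPEC =====
def Spec_parse_effects_py (effects_text : String) (out : List String) : Prop := out = parse_effects_py_alt effects_text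
instance (effects_text : String) (out : List String) : Decidable (Spec_parse_effects_py effects_text out) := by unfold Spec_parse_effects_py; infer_instance

-- ===== CLAIM (what is proved, stated in full; the proofs are below) =====
def Claim_equal_parse_effects_py : Prop := ∀ (effects_text : String), Dom_parse_effects_py effects_text → Spec_parse_effects_py effects_text (parse_effects_py effects_text)

-- ===== LEMMAS AND PROOFS =====

-- reference tokenizer: split a char list at every char satisfying p
def pvSplitP (p : Char → Bool) : List Char → List (List Char)
  | [] => [[]]
  | c :: cs =>
    if p c then [] :: pvSplitP p cs
    else (pvSplitP p cs).modifyHead (c :: ·)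

theorem pvSplitP_ne_nil (p : Char → Bool) (cs : List Char) : pvSplitP p cs ≠ [] := by
  induction cs with
  | nil => simp [pvSplitP]
  | cons c cs ih =>
    simp only [pvSplitP]
    split
    · simp
    · cases h : pvSplitP p cs with
      | nil => exact absurd h ih
      | cons t ts => simp [List.modifyHead]

-- strip + drop-empty + pack, as a flatMap
def pvFilt (xs : List (List Char)) : List String :=
  xs.flatMap (fun e => if PySem.Chars.strip e ≠ [] then [String.ofList (PySem.Chars.strip e)] else [])

theorem pvFilt_eq_filter_map (xs : List (List Char)) :
    ((xs.filter (fun e => decide (PySem.Chars.strip e ≠ []))).map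
        (fun e => String.ofList (PySem.Chars.strip e))) = pvFilt xs := by
  induction xs with
  | nil => rfl
  | cons x xs ih =>
    by_cases h : PySem.Chars.strip x = [] <;>
      simp only [pvFilt, List.flatMap_cons, List.filter_cons, List.map_cons, h,
        ne_eq, not_true_eq_false, not_false_eq_true, decide_true, decide_false, if_true, if_false,
        ite_not] <;> simp [pvFilt] at ih ⊢ <;> simp [ih]

-- single-char replace is a map
theorem pvReplaceGo_single (o n : Char) :
    ∀ (fuel : Nat) (l acc : List Char), l.length ≤ fuel →
      PySem.Chars.replace.go [o] [n] fuel l acc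
        = acc.reverse ++ l.map (fun c => if c = o then n else c) := by
  intro fuel
  induction fuel with
  | zero =>
    intro l acc h
    cases l with
    | nil => simp [PySem.Chars.replace.go]
    | cons c t => simp at h
  | succ f ih =>
    intro l acc h
    cases l with
    | nil => simp [PySem.Chars.replace.go]
    | cons c t =>
      have hp : ([o].isPrefixOf (c :: t)) = (o == c) := by
        cases t <;> simp [List.isPrefixOf]
      simp only [PySem.Chars.replace.go, hp]
      by_cases hc : o = c
      · subst hc
        simp only [beq_self_eq_true, if_true, List.length_cons, List.length_nil,
          Nat.zero_add, List.drop_succ_cons, List.drop_zero]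
        rw [ih t ([n].reverse ++ acc) (by simp at h; omega)]
        simp
      · have hb : (o == c) = false := by simp [hc]
        have hcc : ¬ c = o := fun h' => hc h'.symm
        simp only [hb, Bool.false_eq_true, if_false]
        rw [ih t (c :: acc) (by simp at h ⊢; omega)]
        simp [hcc]

theorem pvReplace_single (o n : Char) (cs : List Char) :
    PySem.Chars.replace cs [o] [n] = cs.map (fun c => if c = o then n else c) := by
  rw [PySem.Chars.replace, if_neg (by simp)]
  exact pvReplaceGo_single o n cs.length cs [] le_rfl

theorem pvModifyHead_id (xs : List (List Char)) : xs.modifyHead (List.nil ++ ·) = xs := by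
  cases xs <;> simp [List.modifyHead]

theorem pvModifyHead_idfun (xs : List (List Char)) : xs.modifyHead (fun x => x) = xs := by
  cases xs <;> simp [List.modifyHead]

-- splitOn with a single-char separator is pvSplitP
theorem pvSplitOnGo (d : Char) :
    ∀ (fuel : Nat) (l cur : List Char) (accs : List (List Char)), l.length ≤ fuel →
      PySem.Chars.splitOn.go [d] fuel l cur accs
        = accs.reverse ++ (pvSplitP (· == d) l).modifyHead (cur.reverse ++ ·) := by
  intro fuel
  induction fuel with
  | zero =>
    intro l cur accs h
    cases l with
    | nil => simp [PySem.Chars.splitOn.go, pvSplitP, List.modifyHead]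
    | cons c t => simp at h
  | succ f ih =>
    intro l cur accs h
    cases l with
    | nil => simp [PySem.Chars.splitOn.go, pvSplitP, List.modifyHead]
    | cons c t =>
      have hp : ([d].isPrefixOf (c :: t)) = (d == c) := by
        cases t <;> simp [List.isPrefixOf]
      simp only [PySem.Chars.splitOn.go, hp]
      by_cases hc : c = d
      · subst hc
        simp only [beq_self_eq_true, if_true, List.length_cons, List.length_nil,
          Nat.zero_add, List.drop_succ_cons, List.drop_zero]
        rw [ih t [] (cur.reverse :: accs) (by simp at h; omega)]
        rw [show pvSplitP (· == c) (c :: t) = [] :: pvSplitP (· == c) t by simp [pvSplitP]]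
        simp only [List.modifyHead, List.reverse_cons]
        cases pvSplitP (fun x => x == c) t <;> simp
      · have hb : (d == c) = false := by
          simp only [beq_eq_false_iff_ne, ne_eq]
          exact fun h' => hc h'.symm
        simp only [hb, Bool.false_eq_true, if_false]
        rw [ih t (c :: cur) accs (by simp at h ⊢; omega)]
        have hb2 : (c == d) = false := by simp [hc]
        rw [show pvSplitP (· == d) (c :: t) = (pvSplitP (· == d) t).modifyHead (c :: ·) by
          simp [pvSplitP, hb2]]
        obtain ⟨hd, tl, heq⟩ := List.exists_cons_of_ne_nil (pvSplitP_ne_nil (· == d) t)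
        rw [heq]
        simp [List.modifyHead]

theorem pvSplitOn_single (d : Char) (cs : List Char) :
    PySem.Chars.splitOn cs [d] = pvSplitP (· == d) cs := by
  rw [PySem.Chars.splitOn, pvSplitOnGo d (cs.length + 1) cs [] [] (by omega)]
  simp [pvModifyHead_idfun]

-- the composed replace map sends exactly the separators to '|'
def pvF (c : Char) : Char := if pvSepB c then '|' else c

theorem pvF_comp (c : Char) :
    (if (if (if c = ',' then '|' else c) = ';' then '|'
         else (if c = ',' then '|' else c)) = '\n' then '|'
     else (if (if c = ',' then '|' else c) = ';' then '|'
           else (if c = ',' then '|' else c))) = pvF c := by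
  simp only [pvF, pvSepB]
  by_cases h1 : c = ',' <;> by_cases h2 : c = ';' <;> by_cases h3 : c = '\n' <;>
    by_cases h4 : c = '|' <;> simp_all

theorem pvSplitP_map (cs : List Char) :
    pvSplitP (· == '|') (cs.map pvF) = pvSplitP pvSepB cs := by
  induction cs with
  | nil => rfl
  | cons c cs ih =>
    by_cases h : pvSepB c = true
    · have hc : pvF c = '|' := by simp [pvF, h]
      simp [pvSplitP, hc, h, ih]
    · have h1 : pvF c = c := by simp [pvF, h]
      have h2 : (c == '|') = false := by
        simp only [pvSepB, Bool.or_eq_true, beq_iff_eq] at h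
        rw [not_or, not_or, not_or] at h
        simp only [beq_eq_false_iff_ne, ne_eq]
        exact h.2
      simp [pvSplitP, h1, h2, h, ih]

-- B's fold satisfies the tokenizing invariant
theorem pvFoldB (cs : List Char) :
    ∀ (parts : List String) (cur : List Char),
      ((cs ++ [',']).foldl pvStepB (parts, cur)).1
        = parts ++ pvFilt ((pvSplitP pvSepB cs).modifyHead (cur ++ ·)) := by
  induction cs with
  | nil =>
    intro parts cur
    simp only [List.nil_append, List.foldl_cons, List.foldl_nil, pvStepB, pvSepB]
    rw [if_pos (by decide)]
    simp only [pvSplitP, List.modifyHead, pvFilt, List.flatMap_cons, List.flatMap_nil,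
      List.append_nil]
    split_ifs <;> simp
  | cons c cs ih =>
    intro parts cur
    by_cases h : pvSepB c = true
    · simp only [List.cons_append, List.foldl_cons, pvStepB, h, if_true]
      rw [ih]
      rw [show pvSplitP pvSepB (c :: cs) = [] :: pvSplitP pvSepB cs by simp [pvSplitP, h]]
      rw [pvModifyHead_id]
      simp only [List.modifyHead, pvFilt, List.flatMap_cons, List.append_nil]
      split_ifs <;> simp [List.append_assoc]
    · simp only [List.cons_append, List.foldl_cons, pvStepB, h, Bool.false_eq_true, if_false]
      rw [ih]
      rw [show pvSplitP pvSepB (c :: cs) = (pvSplitP pvSepB cs).modifyHead (c :: ·) by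
        simp [pvSplitP, h]]
      obtain ⟨hd, tl, heq⟩ := List.exists_cons_of_ne_nil (pvSplitP_ne_nil pvSepB cs)
      rw [heq]
      simp [List.modifyHead]

-- ===== VERDICT (by name: the statement is the Claim_ definition above) =====
theorem parse_effects_py_spec : Claim_equal_parse_effects_py := by
  intro s _
  unfold Spec_parse_effects_py parse_effects_py parse_effects_py_alt
  by_cases hs : s = ""
  · simp [hs]
  · rw [if_neg hs, if_neg hs]
    rw [pvFilt_eq_filter_map]
    rw [pvFoldB]
    rw [pvModifyHead_id, List.nil_append]
    refine congrArg pvFilt ?_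
    rw [show ([",", ";", "\n"].foldl (fun acc sep => PySem.Str.replace acc sep "|") s).toList
        = ((s.toList.map (fun c => if c = ',' then '|' else c)).map
            (fun c => if c = ';' then '|' else c)).map (fun c => if c = '\n' then '|' else c) by
      simp only [List.foldl_cons, List.foldl_nil, PySem.Str.toList_replace,
        show (",".toList) = [','] from rfl, show (";".toList) = [';'] from rfl,
        show ("\n".toList) = ['\n'] from rfl, show ("|".toList) = ['|'] from rfl]
      rw [pvReplace_single, pvReplace_single, pvReplace_single]]
    simp only [List.map_map]
    rw [show ((fun c => if c = '\n' then '|' else c) ∘ (fun c => if c = ';' then '|' else c) ∘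
          (fun c => if c = ',' then '|' else c)) = pvF by
      funext c; exact pvF_comp c]
    rw [pvSplitOn_single, pvSplitP_map]
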